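-- pv_equiv track=rewrite | github.com/henriquemcmedeiros/Reversi-Othello-Q-Learning | utility.py | calc_recompensa
-- ===== SOURCE A (Python) =====
-- def calc_recompensa(tabuleiro, player):
--   player_score = 0
--   oponente_score = 0
--   for linha in tabuleiro:
--     for elemento in linha:
--       if elemento == player:
--         player_score += 1
--       elif elemento != ' ':
--         oponente_score += 1
--   return player_score - oponente_score
-- ===== SOURCE B (Python) =====
-- def calc_recompensa(tabuleiro, player):
--     counts = {}
--     for linha in tabuleiro:
--         for e in linha:
--             counts[e] = counts.get(e, 0) + 1
--     player_score = counts.get(player, 0)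
--     oponente_score = sum(v for k, v in counts.items() if k != player and k != ' ')
--     return player_score - oponente_score
-- ===== Notes on version B (the rewrite author's own statement) =====
-- stated objective: alternative
-- what changed: B builds a frequency table of all cells in one pass and then derives both scores from the distinct symbols (player count by lookup, opponent score by summing counts of keys other than player and ' '), instead of A's per-cell branch updating two counters.
import Mathlib
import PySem

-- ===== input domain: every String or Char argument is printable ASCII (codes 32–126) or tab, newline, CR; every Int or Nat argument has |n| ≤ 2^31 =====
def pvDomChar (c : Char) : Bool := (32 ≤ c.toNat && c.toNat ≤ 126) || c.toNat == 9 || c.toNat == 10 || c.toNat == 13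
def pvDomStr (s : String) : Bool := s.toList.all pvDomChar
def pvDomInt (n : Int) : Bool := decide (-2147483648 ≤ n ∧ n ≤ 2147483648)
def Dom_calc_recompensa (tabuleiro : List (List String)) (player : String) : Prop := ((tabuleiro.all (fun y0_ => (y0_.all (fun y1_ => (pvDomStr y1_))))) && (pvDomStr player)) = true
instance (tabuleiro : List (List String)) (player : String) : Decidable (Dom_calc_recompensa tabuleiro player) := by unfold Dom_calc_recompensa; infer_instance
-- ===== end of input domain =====

-- B replaces A's per-cell branching by a frequency table over all cells followed by a pass over
-- the distinct symbols (alternative decomposition; same asymptotic cost).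

-- ===== PORT A =====
def calc_recompensa (tabuleiro : List (List String)) (player : String) : Int :=
  let scores := tabuleiro.foldl (fun acc linha =>
    linha.foldl (fun acc elemento =>
      if elemento == player then (acc.1 + 1, acc.2)
      else if elemento != " " then (acc.1, acc.2 + 1)
      else acc) acc) ((0 : Int), (0 : Int))
  scores.1 - scores.2

-- ===== PORT B =====
def calc_recompensa_alt (tabuleiro : List (List String)) (player : String) : Int :=
  let counts : PySem.Dict String Int := tabuleiro.foldl (fun d linha =>
    linha.foldl (fun d e => d.insert e (d.getD e 0 + 1)) d) PySem.Dict.empty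
  let player_score := counts.getD player 0
  let oponente_score := ((counts.items.filter (fun kv => kv.1 != player && kv.1 != " ")).map (fun kv => kv.2)).sum
  player_score - oponente_score

-- ===== PRECONDITION & SPEC =====
def Spec_calc_recompensa (tabuleiro : List (List String)) (player : String) (out : Int) : Prop := out = calc_recompensa_alt tabuleiro player
instance (tabuleiro : List (List String)) (player : String) (out : Int) : Decidable (Spec_calc_recompensa tabuleiro player out) := by unfold Spec_calc_recompensa; infer_instance

-- ===== CLAIM (what is proved, stated in full; the proofs are below) =====
def Claim_equal_calc_recompensa : Prop := ∀ (tabuleiro : List (List String)) (player : String), Dom_calc_recompensa tabuleiro player → Spec_calc_recompensa tabuleiro player (calc_recompensa tabuleiro player)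

-- ===== LEMMAS AND PROOFS =====

-- a nested loop over the rows is the loop over all cells in order
theorem pv_foldl_rows {σ : Type} (f : σ → String → σ) (tab : List (List String)) (a : σ) :
    tab.foldl (fun acc l => l.foldl f acc) a = (tab.flatMap id).foldl f a := by
  induction tab generalizing a with
  | nil => rfl
  | cons l t ih => simp only [List.flatMap_cons, List.foldl_append, List.foldl_cons, id, ih]

-- A's loop characterised: it counts player cells and non-player non-blank cells
theorem pv_loopA (player : String) (cs : List String) (ps os : Int) :
    cs.foldl (fun acc e =>
      if e == player then (acc.1 + 1, acc.2)
      else if e != " " then (acc.1, acc.2 + 1)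
      else acc) (ps, os)
    = (ps + cs.count player, os + cs.countP (fun e => e != player && e != " ")) := by
  induction cs generalizing ps os with
  | nil => simp
  | cons c cs ih =>
    rw [List.foldl_cons]
    by_cases hp : c = player
    · subst hp
      rw [if_pos (by simp), ih]
      simp only [List.count_cons, List.countP_cons, Prod.mk.injEq, beq_self_eq_true, bne_self_eq_false,
        Bool.false_and, if_true, if_false]
      constructor <;> push_cast <;> ring
    · rw [if_neg (by simp [hp])]
      by_cases hb : c = " "
      · subst hb
        rw [if_neg (by simp), ih]
        simp [List.count_cons, List.countP_cons]
        all_goals exact hp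
      · rw [if_pos (by simp [hb]), ih]
        simp only [List.count_cons, List.countP_cons, Prod.mk.injEq]
        have h1 : (c == player) = false := by simp [hp]
        have h2 : (c != player && c != " ") = true := by simp [hp, hb]
        simp only [h1, h2, Bool.false_eq_true, if_false, if_true]
        constructor <;> push_cast <;> ring

-- a 0/1-sum over a duplicate-free list is a membership test
theorem pv_sum_ite_mem (c : String) (L : List String) (h : L.Nodup) :
    (L.map (fun k => if k == c then (1 : Int) else 0)).sum = if c ∈ L then 1 else 0 := by
  induction L with
  | nil => simp
  | cons x L ih =>
    rcases List.nodup_cons.mp h with ⟨hx, hL⟩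
    rw [List.map_cons, List.sum_cons, ih hL]
    by_cases hxc : x = c
    · subst hxc
      simp [hx]
    · simp [hxc, Ne.symm hxc]

-- summing per-key counts over the distinct keys that pass a predicate is countP
theorem pv_sum_counts (p : String → Bool) (ks cs : List String) (hnd : ks.Nodup)
    (hmem : ∀ x ∈ cs, x ∈ ks) :
    ((ks.filter p).map (fun k => (cs.count k : Int))).sum = (cs.countP p : Int) := by
  induction cs with
  | nil => simp
  | cons c cs ih =>
    have hc : c ∈ ks := hmem c (List.mem_cons_self ..)
    have hmem' : ∀ x ∈ cs, x ∈ ks := fun x hx => hmem x (List.mem_cons_of_mem _ hx)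
    have hcount : ∀ k, ((c :: cs).count k : Int) = (cs.count k : Int) + (if k == c then (1 : Int) else 0) := by
      intro k
      by_cases h : k = c
      · simp [List.count_cons, h]
      · simp [List.count_cons, h, Ne.symm h]
    calc ((ks.filter p).map (fun k => ((c :: cs).count k : Int))).sum
        = ((ks.filter p).map (fun k => (cs.count k : Int) + (if k == c then (1 : Int) else 0))).sum := by
          congr 1; exact List.map_congr_left (fun k _ => hcount k)
      _ = ((ks.filter p).map (fun k => (cs.count k : Int))).sum
            + ((ks.filter p).map (fun k => if k == c then (1 : Int) else 0)).sum := by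
          rw [PySem.List.sum_map_add_int]
      _ = (cs.countP p : Int) + (if c ∈ ks.filter p then 1 else 0) := by
          rw [ih hmem', pv_sum_ite_mem c _ (hnd.filter p)]
      _ = ((c :: cs).countP p : Int) := by
          by_cases hp : p c = true
          · simp [List.countP_cons, hp, List.mem_filter, hc]
          · simp [List.countP_cons, hp, List.mem_filter]

-- ===== VERDICT (by name: the statement is the Claim_ definition above) =====
theorem calc_recompensa_spec : Claim_equal_calc_recompensa := by
  intro tabuleiro player _
  unfold Spec_calc_recompensa calc_recompensa calc_recompensa_alt
  rw [pv_foldl_rows, pv_foldl_rows, pv_loopA, PySem.Dict.foldl_insert_getD_add_one_eq_counter]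
  simp only [PySem.Dict.getD_counter, PySem.Dict.items_counter, List.filter_map, List.map_map,
    Function.comp_def]
  rw [pv_sum_counts (fun k => k != player && k != " ") (PySem.Set.ofList (tabuleiro.flatMap id))
      (tabuleiro.flatMap id) (PySem.Set.nodup_ofList _)
      (fun x hx => by simpa [PySem.Set.mem_ofList] using hx)]
  push_cast
  ring
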